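-- pv_equiv track=rewrite | github.com/alinafghan/AdVisory_FYP | node_backend/audience_predictor.py | map_trend_tags_to_themes
-- ===== SOURCE A (Python) =====
-- def map_trend_tags_to_themes(trends):
--     themes = {
--         "Gen Z aesthetic": [
--             "vaporwave",
--             "neon",
--             "influencer",
--             "TikTok",
--             "streetwear",
--             "dopamine",
--             "bold",
--             "colorful"
--         ],
--         "luxury minimalism": [
--             "clean",
--             "minimalist",
--             "studio lighting",
--             "white background",
--             "modern",
--         ],
--         "eco-conscious": ["natural", "plant", "organic", "outdoor", "greenery"],
--         "high fashion": ["editorial", "runway", "couture", "fashion magazine"],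
--         "corporate": ["dark", "professional", "business", "formal"],
--     }
--     matched = []
--     for theme, keywords in themes.items():
--         if any(keyword.lower() in trend.lower() for trend in trends for keyword in keywords):
--             matched.append(theme)
--     return matched if matched else ["contemporary"]
-- ===== SOURCE B (Python) =====
-- def map_trend_tags_to_themes(trends):
--     themes = {
--         "Gen Z aesthetic": [
--             "vaporwave",
--             "neon",
--             "influencer",
--             "TikTok",
--             "streetwear",
--             "dopamine",
--             "bold",
--             "colorful"
--         ],
--         "luxury minimalism": [
--             "clean",
--             "minimalist",
--             "studio lighting",
--             "white background",
--             "modern",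
--         ],
--         "eco-conscious": ["natural", "plant", "organic", "outdoor", "greenery"],
--         "high fashion": ["editorial", "runway", "couture", "fashion magazine"],
--         "corporate": ["dark", "professional", "business", "formal"],
--     }
--     # One newline-joined haystack: since no keyword contains '\n', a keyword is a
--     # substring of the blob iff it is a substring of some single lowercased trend.
--     blob = "\n".join(t.lower() for t in trends)
--     matched = [theme for theme, keywords in themes.items()
--                if any(keyword.lower() in blob for keyword in keywords)]
--     return matched if matched else ["contemporary"]
-- ===== Notes on version B (the rewrite author's own statement) =====
-- stated objective: faster
-- what changed: B joins all lowercased trends once into a single newline-separated haystack and runs one substring test per keyword against it (correct because no keyword contains a newline), instead of A's per-theme any() over the full (trend, keyword) cross product with the trend re-lowercased for every keyword.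
import Mathlib
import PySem

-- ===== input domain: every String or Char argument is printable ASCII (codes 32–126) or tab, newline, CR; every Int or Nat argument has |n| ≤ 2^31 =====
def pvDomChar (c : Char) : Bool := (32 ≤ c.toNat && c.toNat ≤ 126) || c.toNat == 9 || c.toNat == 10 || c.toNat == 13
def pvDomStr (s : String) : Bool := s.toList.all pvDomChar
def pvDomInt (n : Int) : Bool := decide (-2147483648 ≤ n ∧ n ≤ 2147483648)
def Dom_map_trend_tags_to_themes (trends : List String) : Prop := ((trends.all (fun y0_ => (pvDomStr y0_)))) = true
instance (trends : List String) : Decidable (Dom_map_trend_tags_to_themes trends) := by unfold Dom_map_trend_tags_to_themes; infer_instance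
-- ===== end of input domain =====

-- B joins all lowercased trends once into a single newline-separated haystack and runs one
-- substring test per keyword against it (no keyword contains a newline); objective: faster (constant-factor, measured).

-- the dict literal (all keys fresh), shared by both ports as an insertion-order association list
def pvThemes : List (String × List String) :=
  [("Gen Z aesthetic", ["vaporwave", "neon", "influencer", "TikTok", "streetwear", "dopamine", "bold", "colorful"]),
   ("luxury minimalism", ["clean", "minimalist", "studio lighting", "white background", "modern"]),
   ("eco-conscious", ["natural", "plant", "organic", "outdoor", "greenery"]),
   ("high fashion", ["editorial", "runway", "couture", "fashion magazine"]),
   ("corporate", ["dark", "professional", "business", "formal"])]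

-- ===== PORT A =====
def map_trend_tags_to_themes (trends : List String) : List String :=
  let matched : List String :=
    pvThemes.foldl (fun matched p =>
      if trends.any (fun trend => p.2.any (fun keyword =>
           PySem.Str.isIn (PySem.Str.lower keyword) (PySem.Str.lower trend)))
      then matched ++ [p.1] else matched) []
  if matched = [] then ["contemporary"] else matched

-- ===== PORT B =====
def map_trend_tags_to_themes_alt (trends : List String) : List String :=
  let blob := PySem.Str.join "\n" (trends.map (fun t => PySem.Str.lower t))
  let matched : List String :=
    (pvThemes.filter (fun p =>
      p.2.any (fun keyword => PySem.Str.isIn (PySem.Str.lower keyword) blob))).map Prod.fst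
  if matched = [] then ["contemporary"] else matched

-- ===== PRECONDITION & SPEC =====
def Spec_map_trend_tags_to_themes (trends : List String) (out : List String) : Prop := out = map_trend_tags_to_themes_alt trends
instance (trends : List String) (out : List String) : Decidable (Spec_map_trend_tags_to_themes trends out) := by unfold Spec_map_trend_tags_to_themes; infer_instance

-- ===== CLAIM (what is proved, stated in full; the proofs are below) =====
def Claim_equal_map_trend_tags_to_themes : Prop := ∀ (trends : List String), Dom_map_trend_tags_to_themes trends → Spec_map_trend_tags_to_themes trends (map_trend_tags_to_themes trends)

-- ===== LEMMAS AND PROOFS =====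

-- a nonempty k avoiding c sits inside a ++ c :: b iff it sits inside a or inside b
theorem pv_prefix_drop_sep (k a b : List Char) (c : Char) (hne : k ≠ []) (hc : c ∉ k) :
    (∃ j, k <+: (a ++ c :: b).drop j) ↔ (∃ j, k <+: a.drop j) ∨ (∃ j, k <+: b.drop j) := by
  constructor
  · rintro ⟨j, hj⟩
    by_cases hja : j ≤ a.length
    · rw [List.drop_append_of_le_length hja] at hj
      by_cases hlen : k.length ≤ a.length - j
      · left
        refine ⟨j, ?_⟩
        have hlen' : k.length ≤ (a.drop j).length := by
          rw [List.length_drop]; exact hlen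
        have := List.prefix_iff_eq_take.mp hj
        rw [List.take_append_of_le_length hlen'] at this
        rw [this]
        exact List.take_prefix _ _
      · exfalso
        have hdl : (a.drop j).length = a.length - j := List.length_drop
        have hi : a.length - j < k.length := by omega
        have hgc : (a.drop j ++ c :: b)[a.length - j]'(by
            rw [List.length_append, hdl, List.length_cons]; omega) = c := by
          rw [List.getElem_append_right (by rw [hdl])]
          simp [hdl]
        have hkc : k[a.length - j]'hi = c := (hj.getElem hi).trans hgc
        exact hc (hkc ▸ List.getElem_mem hi)
    · right
      obtain ⟨m, rfl⟩ : ∃ m, j = a.length + (m + 1) := ⟨j - a.length - 1, by omega⟩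
      refine ⟨m, ?_⟩
      rw [List.drop_append] at hj
      have h1 : a.length + (m + 1) - a.length = m + 1 := by omega
      rw [h1] at hj
      simpa [List.drop_eq_nil_of_le (by omega : a.length ≤ a.length + (m+1))] using hj
  · rintro (⟨j, hj⟩ | ⟨j, hj⟩)
    · by_cases hja : j ≤ a.length
      · refine ⟨j, ?_⟩
        rw [List.drop_append_of_le_length hja]
        exact hj.trans (List.prefix_append _ _)
      · exfalso
        rw [List.drop_eq_nil_of_le (by omega)] at hj
        exact hne (List.prefix_nil.mp hj)
    · refine ⟨a.length + (j + 1), ?_⟩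
      rw [List.drop_append]
      have h1 : a.length + (j + 1) - a.length = j + 1 := by omega
      rw [h1]
      simpa [List.drop_eq_nil_of_le (by omega : a.length ≤ a.length + (j+1))] using hj

-- k (nonempty, newline-free) is inside the '\n'-join iff it is inside some part
theorem pv_infix_join (k : List Char) (hne : k ≠ []) (hnl : '\n' ∉ k) (parts : List (List Char)) :
    PySem.Chars.isIn k (PySem.Chars.join ['\n'] parts) = parts.any (fun p => PySem.Chars.isIn k p) := by
  rw [Bool.eq_iff_iff]
  rw [← PySem.Chars.exists_prefix_drop_iff_isIn, List.any_eq_true]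
  induction parts with
  | nil =>
    rw [PySem.Chars.join_nil]
    simp only [List.drop_nil, List.prefix_nil]
    constructor
    · rintro ⟨j, hj⟩; exact absurd hj hne
    · rintro ⟨p, hp, _⟩; exact absurd hp (List.not_mem_nil)
  | cons p rest ih =>
    cases rest with
    | nil =>
      rw [PySem.Chars.join_singleton]
      rw [PySem.Chars.exists_prefix_drop_iff_isIn]
      constructor
      · intro h; exact ⟨p, by simp, h⟩
      · rintro ⟨q, hq, h⟩; simp at hq; subst hq; exact h
    | cons q rest' =>
      rw [PySem.Chars.join_cons_cons, List.append_assoc, List.singleton_append,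
          pv_prefix_drop_sep k p _ '\n' hne hnl]
      constructor
      · rintro (h | h)
        · exact ⟨p, by simp, (PySem.Chars.exists_prefix_drop_iff_isIn k p).mp h⟩
        · obtain ⟨r, hr, hrin⟩ := ih.mp h
          exact ⟨r, List.mem_cons_of_mem _ hr, hrin⟩
      · rintro ⟨r, hr, hrin⟩
        rcases List.mem_cons.mp hr with rfl | hr'
        · exact Or.inl ((PySem.Chars.exists_prefix_drop_iff_isIn k r).mpr hrin)
        · exact Or.inr (ih.mpr ⟨r, hr', hrin⟩)

-- the Str-level consequence for one keyword against the blob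
theorem pv_isIn_blob (s : String) (hne : s.toList ≠ []) (hnl : '\n' ∉ s.toList) (trends : List String) :
    PySem.Str.isIn s (PySem.Str.join "\n" (trends.map (fun t => PySem.Str.lower t)))
      = trends.any (fun tr => PySem.Str.isIn s (PySem.Str.lower tr)) := by
  rw [PySem.Str.isIn_eq, PySem.Str.toList_join]
  have hsep : "\n".toList = ['\n'] := rfl
  rw [hsep, List.map_map]
  rw [pv_infix_join s.toList hne hnl]
  rw [List.any_map]
  apply List.any_congr rfl
  intro tr
  simp [Function.comp, PySem.Str.isIn_eq]

-- swapping two independent any's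
theorem pv_any_comm {α β : Type} (l : List α) (m : List β) (f : α → β → Bool) :
    (l.any fun a => m.any fun b => f a b) = (m.any fun b => l.any fun a => f a b) := by
  rw [Bool.eq_iff_iff]
  simp only [List.any_eq_true]
  tauto

-- pointwise-on-members congruence for any
theorem pv_any_congr_mem {α : Type} (l : List α) (p q : α → Bool)
    (h : ∀ x ∈ l, p x = q x) : l.any p = l.any q := by
  induction l with
  | nil => rfl
  | cons x l ih =>
    simp only [List.any_cons, h x (List.mem_cons_self), ih (fun y hy => h y (List.mem_cons_of_mem _ hy))]

theorem map_trend_tags_to_themes_eq (trends : List String) :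
    map_trend_tags_to_themes trends = map_trend_tags_to_themes_alt trends := by
  have hkw : ∀ p ∈ pvThemes, ∀ k ∈ p.2,
      (PySem.Str.lower k).toList ≠ [] ∧ '\n' ∉ (PySem.Str.lower k).toList := by decide
  simp only [map_trend_tags_to_themes, map_trend_tags_to_themes_alt]
  rw [PySem.List.foldl_append_if
    (fun p : String × List String => trends.any (fun trend => p.2.any (fun keyword =>
      PySem.Str.isIn (PySem.Str.lower keyword) (PySem.Str.lower trend)))) Prod.fst pvThemes []]
  rw [List.nil_append]
  have hfil : List.filter (fun p : String × List String => trends.any (fun trend =>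
        p.2.any (fun keyword => PySem.Str.isIn (PySem.Str.lower keyword) (PySem.Str.lower trend)))) pvThemes
      = List.filter (fun p : String × List String => p.2.any (fun keyword =>
        PySem.Str.isIn (PySem.Str.lower keyword)
          (PySem.Str.join "\n" (trends.map (fun t => PySem.Str.lower t))))) pvThemes := by
    apply List.filter_congr
    intro p hp
    rw [pv_any_comm trends p.2 (fun trend keyword =>
      PySem.Str.isIn (PySem.Str.lower keyword) (PySem.Str.lower trend))]
    apply pv_any_congr_mem
    intro k hk
    obtain ⟨h1, h2⟩ := hkw p hp k hk
    exact (pv_isIn_blob (PySem.Str.lower k) h1 h2 trends).symm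
  rw [hfil]

-- ===== VERDICT (by name: the statement is the Claim_ definition above) =====
theorem map_trend_tags_to_themes_spec : Claim_equal_map_trend_tags_to_themes := by
  intro trends _
  unfold Spec_map_trend_tags_to_themes
  exact map_trend_tags_to_themes_eq trends
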